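-- pv_equiv track=rewrite | github.com/Ravitejagupta/Data-Sciences | Teja/isBeautifulString.py | isBeautifulString
-- ===== SOURCE A (Python) =====
-- import collections
--
-- def isBeautifulString(inputString):
--     if inputString.count('a') == 0:
--         return False
--     d = {}
--     for i in inputString:
--         d[i] = inputString.count(i)
--     od = collections.OrderedDict(sorted(d.items()))
--     k = list(od.values())
--     s = sorted(od)
--     if (ord(s[len(s)-1]) - ord(s[0]) + 1 == len(s)):
--         return(k == sorted(k,reverse = True))
--     else:
--         return False
-- ===== SOURCE B (Python) =====
-- import collections
--
-- def isBeautifulString(inputString):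
--     if 'a' not in inputString:
--         return False
--     freq = {}
--     for ch in inputString:
--         freq[ch] = freq.get(ch, 0) + 1
--     prev_ch = None
--     prev_n = 0
--     for ch in sorted(freq):
--         n = freq[ch]
--         if prev_ch is not None and (ord(ch) != ord(prev_ch) + 1 or n > prev_n):
--             return False
--         prev_ch, prev_n = ch, n
--     return True
-- ===== Notes on version B (the rewrite author's own statement) =====
-- stated objective: faster
-- what changed: Replaces A's O(n^2) repeated inputString.count per character, the OrderedDict of sorted items and the global `ord(max)-ord(min)+1 == len` plus `k == sorted(k, reverse=True)` tests with a single-pass frequency dict and one linear scan over the sorted distinct characters that checks code adjacency and non-increasing counts locally, returning False at the first violation.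
import Mathlib
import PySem

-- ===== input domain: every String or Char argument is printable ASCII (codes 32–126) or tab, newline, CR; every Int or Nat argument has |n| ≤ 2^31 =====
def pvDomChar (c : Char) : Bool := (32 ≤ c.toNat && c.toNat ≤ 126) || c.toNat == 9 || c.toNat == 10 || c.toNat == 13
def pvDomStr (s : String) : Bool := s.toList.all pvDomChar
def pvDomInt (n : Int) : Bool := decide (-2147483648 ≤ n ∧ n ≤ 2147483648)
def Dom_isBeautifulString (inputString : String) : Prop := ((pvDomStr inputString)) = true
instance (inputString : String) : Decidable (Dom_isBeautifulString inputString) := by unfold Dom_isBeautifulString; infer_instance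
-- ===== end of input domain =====

-- B replaces A's quadratic per-character `inputString.count`, the OrderedDict of sorted items and the two
-- global tests (ord span vs length, values == reverse-sorted copy) by one linear frequency pass and one
-- scan over the sorted distinct characters checking code adjacency and non-increasing counts locally.

-- ===== PORT A =====
def isBeautifulString (inputString : String) : Bool :=
  if PySem.Str.count inputString "a" == 0 then false
  else
    let d : PySem.Dict Char Int := inputString.toList.foldl
      (fun d i => d.insert i ((PySem.Str.count inputString (String.ofList [i]) : Int))) PySem.Dict.empty
    -- sorted(d.items()) compares tuples lexicographically; a dict's keys are distinct, so the
    -- comparison is always decided by the first component — sorting by key is exact here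
    let od : PySem.Dict Char Int := PySem.Dict.ofList (PySem.List.sorted d.items (fun p => p.1))
    let k : List Int := od.values
    let s : List Char := PySem.List.sorted od.keys (fun x => x)
    match PySem.List.pyGet? s ((s.length : Int) - 1), PySem.List.pyGet? s 0 with
    | some lastc, some firstc =>
        if ((lastc.toNat : Int) - (firstc.toNat : Int) + 1) == (s.length : Int) then
          k == PySem.List.sorted k (fun x => x) true
        else false
    | _, _ => false  -- unreachable: s is nonempty because 'a' occurs in inputString

-- ===== PORT B =====
-- the `for ch in sorted(freq)` loop of Source B with its early `return False`
def chkBeautiful (freq : PySem.Dict Char Int) : List Char → Option (Char × Int) → Bool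
  | [], _ => true
  | ch :: rest, prev =>
    let n := freq.getD ch 0
    match prev with
    | some (pc, pn) =>
      if ch.toNat != pc.toNat + 1 || n > pn then false
      else chkBeautiful freq rest (some (ch, n))
    | none => chkBeautiful freq rest (some (ch, n))

def isBeautifulString_alt (inputString : String) : Bool :=
  if !(PySem.Str.isIn "a" inputString) then false
  else
    let freq : PySem.Dict Char Int := inputString.toList.foldl
      (fun d ch => d.insert ch (d.getD ch 0 + 1)) PySem.Dict.empty
    chkBeautiful freq (PySem.List.sorted freq.keys (fun x => x)) none

-- ===== PRECONDITION & SPEC =====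
def Spec_isBeautifulString (inputString : String) (out : Bool) : Prop := out = isBeautifulString_alt inputString
instance (inputString : String) (out : Bool) : Decidable (Spec_isBeautifulString inputString out) := by unfold Spec_isBeautifulString; infer_instance

-- ===== CLAIM (what is proved, stated in full; the proofs are below) =====
def Claim_equal_isBeautifulString : Prop := ∀ (inputString : String), Dom_isBeautifulString inputString → Spec_isBeautifulString inputString (isBeautifulString inputString)

-- ===== LEMMAS AND PROOFS =====

-- s.count(c) for a single-character needle is the character count
theorem count_go_singleton (c : Char) : ∀ (n : Nat) (s : List Char) (acc : Nat), s.length ≤ n →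
    PySem.Chars.count.go [c] n s acc = acc + s.count c := by
  intro n
  induction n with
  | zero => intro s acc h; cases s with
    | nil => simp [PySem.Chars.count.go]
    | cons a t => simp at h
  | succ m ih =>
    intro s acc h
    cases s with
    | nil => simp [PySem.Chars.count.go]
    | cons a t =>
      simp only [PySem.Chars.count.go]
      by_cases hc : a = c
      · subst hc
        simp only [List.isPrefixOf, BEq.rfl, Bool.and_self, if_pos]
        simp only [List.length_cons, List.length_nil, Nat.zero_add, List.drop_succ_cons, List.drop_zero]
        rw [ih t (acc+1) (by simpa using Nat.le_of_succ_le_succ h)]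
        simp
        omega
      · have hpf : ([c].isPrefixOf (a :: t)) = false := by
          simp [List.isPrefixOf]
          exact fun hh => hc hh.symm
        rw [hpf]
        simp only [Bool.false_eq_true, if_false]
        rw [ih t acc (by simpa using Nat.le_of_succ_le_succ h)]
        simp [hc]

theorem chars_count_singleton (s : List Char) (c : Char) :
    PySem.Chars.count s [c] = s.count c := by
  simp [PySem.Chars.count, count_go_singleton c s.length s 0 (le_refl _)]

-- A's dict-building loop: items are the distinct chars in first-occurrence order, each paired with f
theorem itemsA (f : Char → Int) (cs : List Char) : ∀ (S : List Char) (d : PySem.Dict Char Int),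
    d.items = S.map (fun c => (c, f c)) →
    (cs.foldl (fun d i => d.insert i (f i)) d).items
      = (PySem.Set.update S cs).map (fun c => (c, f c)) := by
  induction cs with
  | nil => intro S d h; simpa [PySem.Set.update] using h
  | cons i rest ih =>
    intro S d h
    have key : ∀ T : List Char, (List.map (fun c => (c, f c)) T).any (fun p => p.1 == i) = T.contains i := by
      intro T; induction T with
      | nil => rfl
      | cons a t iht =>
        simp only [List.map_cons, List.any_cons, iht, List.contains_cons]
        rw [show (a == i) = (i == a) from by simp [eq_comm]]
    have hcont : d.contains i = S.contains i := by
      simp only [PySem.Dict.contains, h]; exact key S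
    simp only [List.foldl_cons]
    by_cases hm : S.contains i = true
    · have h2 : (d.insert i (f i)).items = S.map (fun c => (c, f c)) := by
        rw [PySem.Dict.items_insert_of_contains d (f i) (hcont.trans hm), h, List.map_map]
        apply List.map_congr_left
        intro c _
        by_cases hc : c = i
        · subst hc; simp
        · simp [Function.comp, hc]
      have := ih S (d.insert i (f i)) h2
      rw [this]
      simp only [PySem.Set.update, List.foldl_cons, PySem.Set.add, PySem.Set.contains, hm, if_pos]
    · have h2 : (d.insert i (f i)).items = (S ++ [i]).map (fun c => (c, f c)) := by
        rw [PySem.Dict.items_insert_of_not_contains d (f i) (by rw [hcont]; simpa using hm)]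
        simp [h]
      have := ih (S ++ [i]) (d.insert i (f i)) h2
      rw [this]
      simp only [PySem.Set.update, List.foldl_cons, PySem.Set.add, PySem.Set.contains]
      rw [if_neg (by simpa using hm)]

-- B's scan equals the local chain condition
theorem chkBeautiful_eq (freq : PySem.Dict Char Int) (C : List Char) (p : Char) :
    chkBeautiful freq C (some (p, freq.getD p 0))
      = decide (List.IsChain (fun a b : Char => b.toNat = a.toNat + 1 ∧ freq.getD b 0 ≤ freq.getD a 0) (p :: C)) := by
  induction C generalizing p with
  | nil => simp [chkBeautiful]
  | cons c rest ih =>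
    simp only [chkBeautiful, ih c, List.isChain_cons_cons]
    by_cases h1 : c.toNat = p.toNat + 1
    · by_cases h2 : freq.getD c 0 ≤ freq.getD p 0
      · simp [h1, h2, not_lt.mpr h2]
      · simp [h1, h2, lt_of_not_ge h2]
    · simp [h1]

theorem chkBeautiful_none (freq : PySem.Dict Char Int) (C : List Char) :
    chkBeautiful freq C none
      = decide (List.IsChain (fun a b : Char => b.toNat = a.toNat + 1 ∧ freq.getD b 0 ≤ freq.getD a 0) C) := by
  cases C with
  | nil => simp [chkBeautiful]
  | cons c rest => simpa [chkBeautiful] using chkBeautiful_eq freq rest c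

-- a strictly increasing char list spans at least its length
theorem span_ge (c : Char) (rest : List Char)
    (h : List.Pairwise (· < ·) (c :: rest)) :
    c.toNat + rest.length ≤ ((c :: rest).getLast (by simp)).toNat := by
  induction rest generalizing c with
  | nil => simp
  | cons y u ih =>
    have h' : List.Pairwise (· < ·) (y :: u) := h.sublist (List.sublist_cons_self _ _)
    have hcy : c < y := (List.pairwise_cons.mp h).1 y (by simp)
    have := ih y h'
    have hlast : ((c :: y :: u).getLast (by simp)) = ((y :: u).getLast (by simp)) := by
      simp [List.getLast_cons]
    rw [hlast]
    have : c.toNat < y.toNat := hcy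
    simp only [List.length_cons]
    omega

-- on a strictly increasing list the span formula is exactly code-adjacency of neighbours
theorem span_iff_chain (c : Char) (rest : List Char)
    (h : List.Pairwise (· < ·) (c :: rest)) :
    (((c :: rest).getLast (by simp)).toNat : Int) - (c.toNat : Int) + 1 = ((c :: rest).length : Int)
      ↔ List.IsChain (fun a b : Char => b.toNat = a.toNat + 1) (c :: rest) := by
  induction rest generalizing c with
  | nil => simp
  | cons y u ih =>
    have h' : List.Pairwise (· < ·) (y :: u) := h.sublist (List.sublist_cons_self _ _)
    have hcy : c.toNat < y.toNat := (List.pairwise_cons.mp h).1 y (by simp)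
    have hge := span_ge y u h'
    have hlast : ((c :: y :: u).getLast (by simp)) = ((y :: u).getLast (by simp)) := by
      simp [List.getLast_cons]
    rw [hlast, List.isChain_cons_cons, ← ih y h']
    simp only [List.length_cons] at *
    constructor
    · intro hf
      constructor
      · omega
      · push_cast at hf ⊢; omega
    · intro ⟨h1, h2⟩
      push_cast at h2 ⊢; omega

-- list equals its reverse-sorted copy ⟺ it is non-increasing
theorem desc_iff (k : List Int) :
    (k = PySem.List.sorted k (fun x => x) true) ↔ List.Pairwise (fun a b : Int => b ≤ a) k := by
  constructor
  · intro h
    have := PySem.List.sorted_pairwise_rev k (fun x => x)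
    rw [← h] at this
    exact this
  · intro h
    exact (PySem.List.sorted_rev_eq_self_of_pairwise k (fun x => x) h).symm

theorem isChain_and_iff {α : Type} (P Q : α → α → Prop) (l : List α) :
    List.IsChain (fun a b => P a b ∧ Q a b) l ↔ List.IsChain P l ∧ List.IsChain Q l := by
  induction l with
  | nil => simp
  | cons x t ih =>
    cases t with
    | nil => simp
    | cons y u =>
      simp only [List.isChain_cons_cons, ih]
      tauto

-- ===== VERDICT (by name: the statement is the Claim_ definition above) =====
theorem isBeautifulString_spec : Claim_equal_isBeautifulString := by
  intro inputString _
  unfold Spec_isBeautifulString isBeautifulString isBeautifulString_alt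
  set cs : List Char := inputString.toList with hcs
  -- the two guards agree: count('a') == 0  ⟺  'a' not in the string
  have hcount : PySem.Str.count inputString "a" = cs.count 'a' := by
    rw [PySem.Str.count_eq]
    simpa using chars_count_singleton cs 'a'
  by_cases hmem : 'a' ∈ cs
  · -- both guards pass; compare the two main branches
    have h1 : (PySem.Str.count inputString "a" == 0) = false := by
      rw [hcount]; simp [List.count_eq_zero]; exact hmem
    have h2 : (!PySem.Str.isIn "a" inputString) = false := by
      simp [PySem.Chars.isIn_iff_infix, List.singleton_infix_iff]; exact hmem
    rw [h1, h2]
    simp only [Bool.false_eq_true, if_false]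
    -- A's dict holds each distinct char with its count
    have hfold : (fun (d : PySem.Dict Char Int) i =>
          d.insert i ((PySem.Str.count inputString (String.ofList [i]) : Nat) : Int))
        = (fun d i => d.insert i ((cs.count i : Nat) : Int)) := by
      funext d i
      rw [PySem.Str.count_eq]
      congr 2
      rw [show (String.ofList [i]).toList = [i] from by simp]
      exact chars_count_singleton cs i
    set f : Char → Int := fun c => ((cs.count c : Nat) : Int) with hf
    have hd : (cs.foldl (fun d i =>
          d.insert i ((PySem.Str.count inputString (String.ofList [i]) : Nat) : Int)) PySem.Dict.empty).items
        = (PySem.Set.ofList cs).map (fun c => (c, f c)) := by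
      rw [hfold]
      exact itemsA f cs [] PySem.Dict.empty rfl
    set C : List Char := PySem.List.sorted (PySem.Set.ofList cs) (fun x => x) with hCdef
    have hPW : List.Pairwise (· < ·) C := PySem.List.sorted_ofList_pairwise_lt cs
    have hperm : (C.map (fun c => (c, f c))).Perm ((PySem.Set.ofList cs).map (fun c => (c, f c))) :=
      (PySem.List.sorted_perm _ _ _).map _
    have hsorted : PySem.List.sorted ((PySem.Set.ofList cs).map (fun c => (c, f c))) (fun p => p.1)
        = C.map (fun c => (c, f c)) := by
      apply PySem.List.sorted_eq_of_perm_of_pairwise_lt _ _ _ hperm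
      exact List.pairwise_map.mpr hPW
    have hod : (PySem.Dict.ofList (C.map (fun c => (c, f c)))).items = C.map (fun c => (c, f c)) := by
      have hnodup : (List.map (fun p : Char × Int => p.1) (C.map (fun c => (c, f c)))).Nodup := by
        have hm : List.map (fun p : Char × Int => p.1) (C.map (fun c => (c, f c))) = C := by
          simp [List.map_map, Function.comp_def]
        rw [hm]
        exact hPW.imp ne_of_lt
      have := PySem.Dict.items_foldl_insert_fresh (C.map (fun c => (c, f c)))
        (fun p => p.1) (fun p => p.2) PySem.Dict.empty (fun a _ => rfl) hnodup
      simpa [PySem.Dict.ofList, PySem.Dict.update] using this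
    have hkeysod : (PySem.Dict.ofList (C.map (fun c => (c, f c)))).keys = C := by
      simp [PySem.Dict.keys, hod, List.map_map, Function.comp_def]
    have hvalsod : (PySem.Dict.ofList (C.map (fun c => (c, f c)))).values = C.map f := by
      simp [PySem.Dict.values, hod, List.map_map, Function.comp_def]
    have hsortC : PySem.List.sorted C (fun x => x) = C :=
      PySem.List.sorted_eq_self_of_pairwise C _ (hPW.imp le_of_lt)
    -- B's dict is the counter
    have hfreq : cs.foldl (fun d ch => d.insert ch (d.getD ch 0 + 1)) PySem.Dict.empty
        = PySem.Dict.counter cs := PySem.Dict.foldl_insert_getD_add_one_eq_counter cs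
    have hCne : C ≠ [] := by
      intro hnil
      rw [hCdef, PySem.List.sorted_eq_nil_iff] at hnil
      exact absurd ((PySem.Set.mem_ofList cs 'a').mpr hmem) (by simp [hnil])
    -- assemble both sides
    rw [hd, hsorted, hkeysod, hvalsod, hsortC]
    rw [hfreq, chkBeautiful_none]
    simp only [PySem.Dict.getD_counter, PySem.Dict.keys_counter, ← hCdef]
    obtain ⟨c0, rst, hC⟩ := List.exists_cons_of_ne_nil hCne
    rw [hC] at hPW ⊢
    -- evaluate the two index accesses
    have hget0 : PySem.List.pyGet? (c0 :: rst) 0 = some c0 := by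
      simp [PySem.List.pyGet?, PySem.List.pyIdx?]
    have hgetlast : PySem.List.pyGet? (c0 :: rst) (((c0 :: rst).length : Int) - 1)
        = some ((c0 :: rst).getLast (by simp)) := by
      have hlen : (((c0 :: rst).length : Int) - 1) = (((c0 :: rst).length - 1 : Nat) : Int) := by
        simp only [List.length_cons]; omega
      rw [hlen, PySem.List.pyGet?_natCast]
      rw [List.getLast_eq_getElem]
      exact List.getElem?_eq_getElem (by simp)
    rw [hgetlast, hget0]
    dsimp only
    -- a purely combinational goal over c0 :: rst
    have hchain := span_iff_chain c0 rst hPW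
    have h2iff : List.IsChain (fun a b : Char => f b ≤ f a) (c0 :: rst)
        ↔ List.Pairwise (fun a b : Int => b ≤ a) ((c0 :: rst).map f) := by
      exact (@List.isChain_iff_pairwise _ (fun a b => f b ≤ f a) _
        ⟨fun hab hbc => le_trans hbc hab⟩).trans
        (List.pairwise_map (f := f) (R := fun a b : Int => b ≤ a) (l := c0 :: rst)).symm
    by_cases hspan : ((((c0 :: rst).getLast (by simp)).toNat : Int) - (c0.toNat : Int) + 1)
        = (((c0 :: rst).length : Int))
    · rw [if_pos (by simpa using hspan)]
      rw [Bool.beq_eq_decide_eq]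
      apply decide_eq_decide.mpr
      rw [desc_iff, isChain_and_iff]
      exact ⟨fun h => ⟨hchain.mp hspan, h2iff.mpr h⟩, fun h => h2iff.mp h.2⟩
    · rw [if_neg (by simpa using hspan)]
      symm
      rw [decide_eq_false_iff_not]
      intro hcontra
      exact hspan (hchain.mpr ((isChain_and_iff _ _ _).mp hcontra).1)
  · have h1 : (PySem.Str.count inputString "a" == 0) = true := by
      rw [hcount]; simp [List.count_eq_zero]; exact hmem
    have h2 : (!PySem.Str.isIn "a" inputString) = true := by
      simp [PySem.Chars.isIn_eq_false_iff, List.singleton_infix_iff]; exact hmem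
    rw [h1, h2]
    simp
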